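-- pv_equiv track=rewrite | github.com/e-vergo/side-by-side-blueprint | forks/sbs-lsp-mcp/src/sbs_lsp_mcp/duckdb_layer.py | _detect_skipped_phases_dict
-- ===== SOURCE A (Python) =====
-- def _detect_skipped_phases_dict(session: dict, expected_order: list[str]) -> list[str]:
--     """Detect skipped phases in a dict-based session."""
--     visited = set(session.get("phases_visited", []))
--     if not visited:
--         return []
--     visited_indices = []
--     for phase in session["phases_visited"]:
--         try:
--             visited_indices.append(expected_order.index(phase))
--         except ValueError:
--             continue
--     if len(visited_indices) < 2:
--         return []
--     min_idx = min(visited_indices)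
--     max_idx = max(visited_indices)
--     return [
--         expected_order[i]
--         for i in range(min_idx, max_idx + 1)
--         if i < len(expected_order) and expected_order[i] not in visited
--     ]
-- ===== SOURCE B (Python) =====
-- def _detect_skipped_phases_dict(session: dict, expected_order: list[str]) -> list[str]:
--     """Detect skipped phases in a dict-based session (single flush-on-milestone pass)."""
--     phases = session.get("phases_visited", [])
--     if not phases:
--         return []
--     visited = set(phases)
--     result = []
--     pending = []
--     seen = set()
--     started = False
--     for phase in expected_order:
--         if phase in visited:
--             if phase not in seen:
--                 seen.add(phase)
--                 if started:
--                     result.extend(pending)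
--                 started = True
--                 pending = []
--         elif started:
--             pending.append(phase)
--     return result
-- ===== Notes on version B (the rewrite author's own statement) =====
-- stated objective: alternative
-- what changed: Replaced A's per-phase expected_order.index() scans plus min/max plus a range re-scan with a single pass over expected_order that maintains a pending list, a seen set and a started flag, flushing pending on each first occurrence of a visited phase.
import Mathlib
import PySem

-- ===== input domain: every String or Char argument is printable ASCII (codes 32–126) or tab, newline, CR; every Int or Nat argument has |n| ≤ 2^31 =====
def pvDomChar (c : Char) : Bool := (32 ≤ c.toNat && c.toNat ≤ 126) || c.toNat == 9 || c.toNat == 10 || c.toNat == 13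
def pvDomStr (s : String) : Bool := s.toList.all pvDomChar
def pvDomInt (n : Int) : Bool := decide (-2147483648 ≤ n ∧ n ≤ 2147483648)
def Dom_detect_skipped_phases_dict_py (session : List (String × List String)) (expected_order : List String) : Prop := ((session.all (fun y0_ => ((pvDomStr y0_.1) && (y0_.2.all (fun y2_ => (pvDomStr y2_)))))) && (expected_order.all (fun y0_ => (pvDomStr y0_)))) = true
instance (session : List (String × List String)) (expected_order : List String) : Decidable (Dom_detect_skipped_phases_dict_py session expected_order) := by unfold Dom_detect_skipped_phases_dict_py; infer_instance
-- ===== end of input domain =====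

-- B replaces A's index-list + min/max + range-rescan with a single flush-on-milestone pass over expected_order (different algorithm, single pass).

-- ===== PORT A =====
def detect_skipped_phases_dict_py (session : List (String × List String)) (expected_order : List String) : List String :=
  let visited : PySem.Set String :=
    PySem.Set.ofList (PySem.Dict.getD (PySem.Dict.mk session) "phases_visited" [])
  if visited.isEmpty then []
  else
    -- session["phases_visited"]: the key is present here (visited is nonempty), so the KeyError branch is unreachable; '.getD []' renders it total
    let pv : List String := (PySem.Dict.get? (PySem.Dict.mk session) "phases_visited").getD []
    let visited_indices : List Int :=
      pv.foldl (fun acc phase =>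
        match PySem.List.index? expected_order phase with
        | some k => acc ++ [(k : Int)]
        | none => acc) []
    if visited_indices.length < 2 then []
    else
      -- min()/max() raise only on an empty list; here visited_indices has length ≥ 2, so the none branches are unreachable
      match PySem.List.min? visited_indices (fun x => x), PySem.List.max? visited_indices (fun x => x) with
      | some min_idx, some max_idx =>
        (PySem.List.pyRange min_idx (max_idx + 1) 1).foldl (fun acc i =>
          if i < (expected_order.length : Int) then
            if PySem.Set.contains visited (PySem.List.pyGetD expected_order i "") then acc
            else acc ++ [PySem.List.pyGetD expected_order i ""]
          else acc) []
      | _, _ => []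

-- ===== PORT B =====
def detect_skipped_phases_dict_py_alt (session : List (String × List String)) (expected_order : List String) : List String :=
  let phases : List String := PySem.Dict.getD (PySem.Dict.mk session) "phases_visited" []
  if phases.isEmpty then []
  else
    let visited : PySem.Set String := PySem.Set.ofList phases
    -- state: (result, pending, seen, started)
    (expected_order.foldl
      (fun (st : List String × List String × PySem.Set String × Bool) phase =>
        if PySem.Set.contains visited phase then
          if PySem.Set.contains st.2.2.1 phase then st
          else ((if st.2.2.2 then st.1 ++ st.2.1 else st.1), [], PySem.Set.add st.2.2.1 phase, true)
        else if st.2.2.2 then (st.1, st.2.1 ++ [phase], st.2.2.1, st.2.2.2)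
        else st)
      ([], [], PySem.Set.empty, false)).1

-- ===== PRECONDITION & SPEC =====
def Spec_detect_skipped_phases_dict_py (session : List (String × List String)) (expected_order : List String) (out : List String) : Prop := out = detect_skipped_phases_dict_py_alt session expected_order
instance (session : List (String × List String)) (expected_order : List String) (out : List String) : Decidable (Spec_detect_skipped_phases_dict_py session expected_order out) := by unfold Spec_detect_skipped_phases_dict_py; infer_instance

-- ===== CLAIM (what is proved, stated in full; the proofs are below) =====
def Claim_equal_detect_skipped_phases_dict_py : Prop := ∀ (session : List (String × List String)) (expected_order : List String), Dom_detect_skipped_phases_dict_py session expected_order → Spec_detect_skipped_phases_dict_py session expected_order (detect_skipped_phases_dict_py session expected_order)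

-- ===== LEMMAS AND PROOFS =====

-- indices (into E) of the phases of pv that occur in E, in pv's order (A's visited_indices)
def pvIdxList (E : List String) : List String → List Int
  | [] => []
  | p :: pv =>
    match PySem.List.index? E p with
    | some k => (k : Int) :: pvIdxList E pv
    | none => pvIdxList E pv

-- index of the last "new milestone" of t: a first occurrence of a phase of V not yet in seen
def pvLastNew (V seen : List String) : List String → Option Nat
  | [] => none
  | x :: t =>
    if x ∈ V ∧ x ∉ seen then
      match pvLastNew V (PySem.Set.add seen x) t with
      | some L => some (L + 1)
      | none => some 0
    else (pvLastNew V seen t).map (· + 1)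

-- B's started loop, as a structural recursion
def pvFlush (V : List String) (seen : PySem.Set String) (pending : List String) : List String → List String
  | [] => []
  | x :: t =>
    if x ∈ V then
      if x ∈ seen then pvFlush V seen pending t
      else pending ++ pvFlush V (PySem.Set.add seen x) [] t
    else pvFlush V seen (pending ++ [x]) t

-- B's not-yet-started loop
def pvStart (V : List String) : List String → List String
  | [] => []
  | x :: t => if x ∈ V then pvFlush V [x] [] t else pvStart V t

-- A's body after the pv extraction, as a function of pv and E
def pvAcore (pv E : List String) : List String :=
  if (pvIdxList E pv).length < 2 then []
  else
    match PySem.List.min? (pvIdxList E pv) (fun x => x), PySem.List.max? (pvIdxList E pv) (fun x => x) with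
    | some min_idx, some max_idx =>
      (PySem.List.pyRange min_idx (max_idx + 1) 1).foldl (fun acc i =>
        if i < (E.length : Int) then
          if PySem.Set.contains (PySem.Set.ofList pv) (PySem.List.pyGetD E i "") then acc
          else acc ++ [PySem.List.pyGetD E i ""]
        else acc) []
    | _, _ => []

theorem pv_two_le_length {l : List Int} {a b : Int} (ha : a ∈ l) (hb : b ∈ l) (hne : a ≠ b) :
    2 ≤ l.length := by
  match l, ha, hb with
  | [], ha, _ => simp at ha
  | [c], ha, hb => simp at ha hb; omega
  | _ :: _ :: _, _, _ => simp

theorem pvIdxList_foldl (E pv : List String) (acc : List Int) :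
    pv.foldl (fun acc phase =>
        match PySem.List.index? E phase with
        | some k => acc ++ [(k : Int)]
        | none => acc) acc = acc ++ pvIdxList E pv := by
  induction pv generalizing acc with
  | nil => simp [pvIdxList]
  | cons p pv ih =>
    simp only [List.foldl_cons, pvIdxList]
    cases h : PySem.List.index? E p with
    | none => exact ih acc
    | some k => rw [ih]; simp

theorem mem_pvIdxList {E pv : List String} {z : Int} :
    z ∈ pvIdxList E pv ↔ ∃ p ∈ pv, ∃ k, PySem.List.index? E p = some k ∧ z = (k : Int) := by
  induction pv with
  | nil => simp [pvIdxList]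
  | cons p pv ih =>
    simp only [pvIdxList]
    cases h : PySem.List.index? E p with
    | none =>
      rw [ih]
      constructor
      · rintro ⟨q, hq, k, hk, rfl⟩
        exact ⟨q, by simp [hq], k, hk, rfl⟩
      · rintro ⟨q, hq, k, hk, rfl⟩
        rcases List.mem_cons.1 hq with rfl | hq
        · simp only [PySem.List.index?_eq_idxOf?] at h hk; rw [h] at hk; cases hk
        · exact ⟨q, hq, k, hk, rfl⟩
    | some k0 =>
      simp only [List.mem_cons, ih]
      constructor
      · rintro (rfl | ⟨q, hq, k, hk, rfl⟩)
        · exact ⟨p, Or.inl rfl, k0, h, rfl⟩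
        · exact ⟨q, Or.inr hq, k, hk, rfl⟩
      · rintro ⟨q, rfl | hq, k, hk, rfl⟩
        · rw [h] at hk; cases hk; exact Or.inl rfl
        · exact Or.inr ⟨q, hq, k, hk, rfl⟩

theorem pvIdxList_bounds {E pv : List String} {z : Int} (hz : z ∈ pvIdxList E pv) :
    0 ≤ z ∧ z < (E.length : Int) := by
  rcases mem_pvIdxList.1 hz with ⟨p, _, k, hk, rfl⟩
  obtain ⟨hlt, -⟩ := PySem.List.getElem_of_index?_eq_some hk
  exact ⟨Int.natCast_nonneg k, by exact_mod_cast hlt⟩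

theorem pvIdxList_nil (pv : List String) : pvIdxList [] pv = [] := by
  induction pv with
  | nil => rfl
  | cons p pv ih =>
    have h : PySem.List.index? ([] : List String) p = none :=
      (PySem.List.index?_eq_none_iff _ _).2 (by simp)
    simp [pvIdxList, ih]

theorem pvIdxList_shift {x : String} (t pv : List String) (hx : x ∉ pv) :
    pvIdxList (x :: t) pv = (pvIdxList t pv).map (· + 1) := by
  induction pv with
  | nil => simp [pvIdxList]
  | cons p pv ih =>
    have hpx : x ≠ p := by rintro rfl; exact hx (List.mem_cons_self ..)
    have hx' : x ∉ pv := fun h => hx (List.mem_cons_of_mem _ h)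
    rw [pvIdxList, pvIdxList, PySem.List.index?_cons_of_ne _ hpx]
    cases h : PySem.List.index? t p with
    | none => simp [ih hx']
    | some k => simp [ih hx']

theorem pv_min?_map_add_one (l : List Int) (m : Int)
    (h : PySem.List.min? l (fun x => x) = some m) :
    PySem.List.min? (l.map (· + 1)) (fun x => x) = some (m + 1) := by
  cases l with
  | nil => rw [(PySem.List.min?_eq_none_iff _ _).2 rfl] at h; cases h
  | cons y l =>
    rw [PySem.List.min?_id_cons] at h
    simp only [List.map_cons]
    rw [PySem.List.min?_id_cons]
    cases h
    congr 1
    induction l generalizing y with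
    | nil => rfl
    | cons z l ih => simpa [Int.min_add_right] using ih (min y z)

theorem pv_max?_map_add_one (l : List Int) (m : Int)
    (h : PySem.List.max? l (fun x => x) = some m) :
    PySem.List.max? (l.map (· + 1)) (fun x => x) = some (m + 1) := by
  cases l with
  | nil => rw [(PySem.List.max?_eq_none_iff _ _).2 rfl] at h; cases h
  | cons y l =>
    rw [PySem.List.max?_id_cons] at h
    simp only [List.map_cons]
    rw [PySem.List.max?_id_cons]
    cases h
    congr 1
    induction l generalizing y with
    | nil => rfl
    | cons z l ih => simpa [Int.max_add_right] using ih (max y z)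

theorem pvComp (n : Nat) (E V init : List String) (a b : Int)
    (hn : (b - a).toNat = n) (h0 : 0 ≤ a) (hb : b ≤ (E.length : Int)) :
    (PySem.List.pyRange a b 1).foldl (fun acc i =>
        if i < (E.length : Int) then
          if PySem.Set.contains V (PySem.List.pyGetD E i "") then acc
          else acc ++ [PySem.List.pyGetD E i ""]
        else acc) init
    = init ++ ((E.drop a.toNat).take (b - a).toNat).filter (fun p => !(PySem.Set.contains V p)) := by
  induction n generalizing a init with
  | zero =>
    rw [PySem.List.pyRange_one_eq_nil (by omega)]
    rw [hn]
    simp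
  | succ n ih =>
    have hab : a < b := by omega
    have haE : a < (E.length : Int) := lt_of_lt_of_le hab hb
    have haN : a.toNat < E.length := by omega
    rw [PySem.List.pyRange_one_cons hab]
    simp only [List.foldl_cons]
    rw [if_pos haE, PySem.List.pyGetD_eq_getElem E "" h0 haE]
    rw [List.drop_eq_getElem_cons haN]
    rw [show (b - a).toNat = (b - (a + 1)).toNat + 1 from by omega, List.take_succ_cons]
    rw [List.filter_cons]
    have hsucc : (a + 1).toNat = a.toNat + 1 := by omega
    by_cases hc : PySem.Set.contains V (E[a.toNat]'haN) = true
    · rw [if_pos hc]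
      rw [ih init (a + 1) (by omega) (by omega), hsucc]
      simp [(PySem.Set.contains_iff _ _).1 hc]
    · rw [if_neg hc]
      rw [ih (init ++ [E[a.toNat]'haN]) (a + 1) (by omega) (by omega), hsucc]
      have hcm : E[a.toNat]'haN ∉ V := fun hm => hc ((PySem.Set.contains_iff _ _).2 hm)
      simp [hcm]

theorem pvLastNew_eq_none_iff (V : List String) (t : List String) : ∀ seen : List String,
    (pvLastNew V seen t = none ↔ ∀ p ∈ t, p ∈ V → p ∈ seen) := by
  induction t with
  | nil => intro seen; simp [pvLastNew]
  | cons x t ih =>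
    intro seen
    by_cases hx : x ∈ V ∧ x ∉ seen
    · rw [pvLastNew, if_pos hx]
      constructor
      · intro h
        cases hln : pvLastNew V (PySem.Set.add seen x) t <;> rw [hln] at h <;> cases h
      · intro h
        exact absurd (h x (by simp) hx.1) hx.2
    · rw [pvLastNew, if_neg hx, Option.map_eq_none_iff, ih seen]
      constructor
      · intro h p hp hpV
        rcases List.mem_cons.1 hp with rfl | hp
        · by_cases hxs : p ∈ seen
          · exact hxs
          · exact absurd ⟨hpV, hxs⟩ hx
        · exact h p hp hpV
      · intro h p hp hpV
        exact h p (List.mem_cons_of_mem _ hp) hpV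

theorem pvLastNew_some_spec (V : List String) (t : List String) : ∀ (seen : List String) (L : Nat),
    pvLastNew V seen t = some L →
    ∃ h : L < t.length, t[L] ∈ V ∧ t[L] ∉ seen ∧ t[L] ∉ t.take L := by
  induction t with
  | nil => intro seen L h; simp [pvLastNew] at h
  | cons x t ih =>
    intro seen L h
    by_cases hx : x ∈ V ∧ x ∉ seen
    · rw [pvLastNew, if_pos hx] at h
      cases hln : pvLastNew V (PySem.Set.add seen x) t with
      | none =>
        rw [hln] at h
        cases h
        exact ⟨by simp, hx.1, hx.2, by simp⟩
      | some L' =>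
        rw [hln] at h
        cases h
        obtain ⟨hL', h1, h2, h3⟩ := ih (PySem.Set.add seen x) L' hln
        refine ⟨by simpa using Nat.succ_lt_succ hL', ?_, ?_, ?_⟩
        · simpa using h1
        · simp only [List.getElem_cons_succ]
          intro hs
          exact h2 (by rw [PySem.Set.mem_add]; exact Or.inl hs)
        · simp only [List.getElem_cons_succ, List.take_succ_cons, List.mem_cons]
          rintro (he | hm)
          · exact h2 (by rw [PySem.Set.mem_add]; exact Or.inr he)
          · exact h3 hm
    · rw [pvLastNew, if_neg hx] at h
      rcases Option.map_eq_some_iff.1 h with ⟨L', hln, rfl⟩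
      obtain ⟨hL', h1, h2, h3⟩ := ih seen L' hln
      have hne : t[L'] ≠ x := by
        intro he
        rcases not_and_or.1 hx with hxV | hxs
        · exact hxV (he ▸ h1)
        · rw [Decidable.not_not] at hxs
          exact h2 (he ▸ hxs)
      refine ⟨by simpa using Nat.succ_lt_succ hL', by simpa using h1, by simpa using h2, ?_⟩
      simp only [List.getElem_cons_succ, List.take_succ_cons, List.mem_cons]
      rintro (he | hm)
      · exact hne he
      · exact h3 hm

theorem pvLastNew_ge (V : List String) (t : List String) : ∀ (seen : List String) (L : Nat),
    pvLastNew V seen t = some L →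
    ∀ (k : Nat) (hk : k < t.length), t[k] ∈ V → t[k] ∉ seen → t[k] ∉ t.take k → k ≤ L := by
  induction t with
  | nil => intro seen L h; simp [pvLastNew] at h
  | cons x t ih =>
    intro seen L h k hk h1 h2 h3
    by_cases hx : x ∈ V ∧ x ∉ seen
    · rw [pvLastNew, if_pos hx] at h
      cases k with
      | zero =>
        cases hln : pvLastNew V (PySem.Set.add seen x) t <;> rw [hln] at h <;> cases h <;> omega
      | succ j =>
        simp only [List.getElem_cons_succ] at h1 h2
        have hj3 : t[j]'(by simpa using hk) ∉ t.take j := by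
          simp only [List.take_succ_cons, List.mem_cons] at h3
          exact fun hm => h3 (Or.inr hm)
        have hjx : t[j]'(by simpa using hk) ≠ x := by
          simp only [List.take_succ_cons, List.mem_cons] at h3
          exact fun he => h3 (Or.inl he)
        have hj2 : t[j]'(by simpa using hk) ∉ PySem.Set.add seen x := by
          rw [PySem.Set.mem_add]
          rintro (hs | he)
          · exact h2 hs
          · exact hjx he
        cases hln : pvLastNew V (PySem.Set.add seen x) t with
        | none =>
          have := (pvLastNew_eq_none_iff V t (PySem.Set.add seen x)).1 hln
          exact absurd (this _ (List.getElem_mem _) h1) hj2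
        | some L' =>
          rw [hln] at h
          cases h
          exact Nat.succ_le_succ (ih (PySem.Set.add seen x) L' hln j (by simpa using hk) h1 hj2 hj3)
    · rw [pvLastNew, if_neg hx] at h
      rcases Option.map_eq_some_iff.1 h with ⟨L', hln, rfl⟩
      cases k with
      | zero => omega
      | succ j =>
        simp only [List.getElem_cons_succ] at h1 h2
        have hj3 : t[j]'(by simpa using hk) ∉ t.take j := by
          simp only [List.take_succ_cons, List.mem_cons] at h3
          exact fun hm => h3 (Or.inr hm)
        exact Nat.succ_le_succ (ih seen L' hln j (by simpa using hk) h1 h2 hj3)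

theorem pvFlush_char (V : List String) (t : List String) : ∀ (seen pending : List String),
    pvFlush V seen pending t =
      match pvLastNew V seen t with
      | none => []
      | some L => pending ++ (t.take (L + 1)).filter (fun p => !(PySem.Set.contains V p)) := by
  induction t with
  | nil => intro seen pending; simp [pvFlush, pvLastNew]
  | cons x t ih =>
    intro seen pending
    by_cases hxV : x ∈ V
    · have hcx : PySem.Set.contains V x = true := (PySem.Set.contains_iff _ _).2 hxV
      by_cases hxs : x ∈ seen
      · rw [pvFlush, if_pos hxV, if_pos hxs, ih seen pending]
        rw [pvLastNew, if_neg (by tauto)]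
        cases hln : pvLastNew V seen t with
        | none => simp
        | some L => simp [List.take_succ_cons, hxV]
      · rw [pvFlush, if_pos hxV, if_neg hxs, ih (PySem.Set.add seen x) []]
        rw [pvLastNew, if_pos ⟨hxV, hxs⟩]
        cases hln : pvLastNew V (PySem.Set.add seen x) t with
        | none => simp [List.take_succ_cons, hxV]
        | some L => simp [List.take_succ_cons, hxV]
    · have hcx : PySem.Set.contains V x = false := by
        rw [Bool.eq_false_iff]
        intro hc
        exact hxV ((PySem.Set.contains_iff _ _).1 hc)
      rw [pvFlush, if_neg hxV, ih seen (pending ++ [x])]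
      rw [pvLastNew, if_neg (by tauto)]
      cases hln : pvLastNew V seen t with
      | none => simp
      | some L => simp [List.take_succ_cons, hxV]

theorem pvFoldB_started (V : List String) (E : List String) :
    ∀ (r p : List String) (s : PySem.Set String),
    (E.foldl
      (fun (st : List String × List String × PySem.Set String × Bool) phase =>
        if PySem.Set.contains V phase then
          if PySem.Set.contains st.2.2.1 phase then st
          else ((if st.2.2.2 then st.1 ++ st.2.1 else st.1), [], PySem.Set.add st.2.2.1 phase, true)
        else if st.2.2.2 then (st.1, st.2.1 ++ [phase], st.2.2.1, st.2.2.2)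
        else st)
      (r, p, s, true)).1 = r ++ pvFlush V s p E := by
  induction E with
  | nil => intro r p s; simp [pvFlush]
  | cons x E ih =>
    intro r p s
    simp only [List.foldl_cons]
    by_cases hxV : x ∈ V
    · have hcx : PySem.Set.contains V x = true := (PySem.Set.contains_iff _ _).2 hxV
      by_cases hxs : x ∈ s
      · have hcs : PySem.Set.contains s x = true := (PySem.Set.contains_iff _ _).2 hxs
        simp only [hcx, hcs, if_pos]
        rw [pvFlush, if_pos hxV, if_pos hxs]
        exact ih r p s
      · have hcs : PySem.Set.contains s x = false := by
          rw [Bool.eq_false_iff]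
          exact fun hc => hxs ((PySem.Set.contains_iff _ _).1 hc)
        simp only [hcx, hcs, if_pos, Bool.false_eq_true, if_false]
        rw [pvFlush, if_pos hxV, if_neg hxs]
        rw [ih (r ++ p) [] (PySem.Set.add s x)]
        simp
    · have hcx : PySem.Set.contains V x = false := by
        rw [Bool.eq_false_iff]
        exact fun hc => hxV ((PySem.Set.contains_iff _ _).1 hc)
      simp only [hcx, Bool.false_eq_true, if_false, if_true]
      rw [pvFlush, if_neg hxV]
      exact ih r (p ++ [x]) s

theorem pvFoldB_notstarted (V : List String) (E : List String) :
    (E.foldl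
      (fun (st : List String × List String × PySem.Set String × Bool) phase =>
        if PySem.Set.contains V phase then
          if PySem.Set.contains st.2.2.1 phase then st
          else ((if st.2.2.2 then st.1 ++ st.2.1 else st.1), [], PySem.Set.add st.2.2.1 phase, true)
        else if st.2.2.2 then (st.1, st.2.1 ++ [phase], st.2.2.1, st.2.2.2)
        else st)
      ([], [], PySem.Set.empty, false)).1 = pvStart V E := by
  induction E with
  | nil => simp [pvStart]
  | cons x E ih =>
    simp only [List.foldl_cons]
    by_cases hxV : x ∈ V
    · have hcx : PySem.Set.contains V x = true := (PySem.Set.contains_iff _ _).2 hxV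
      have hce : PySem.Set.contains PySem.Set.empty x = false := by
        rw [Bool.eq_false_iff]
        intro hc
        have := (PySem.Set.contains_iff _ _).1 hc
        simp [PySem.Set.empty] at this
      rw [pvStart, if_pos hxV]
      have h2 := pvFoldB_started V E [] [] (PySem.Set.add PySem.Set.empty x)
      have hadd : PySem.Set.add PySem.Set.empty x = [x] := rfl
      rw [hadd] at h2
      simpa [hcx, hce, hadd, hxV] using h2
    · have hcx : PySem.Set.contains V x = false := by
        rw [Bool.eq_false_iff]
        exact fun hc => hxV ((PySem.Set.contains_iff _ _).1 hc)
      simp only [hcx, Bool.false_eq_true, if_false]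
      rw [pvStart, if_neg hxV]
      exact ih

theorem pvIndex?_of_first (t : List String) (k : Nat) (hk : k < t.length)
    (h3 : t[k] ∉ t.take k) : PySem.List.index? t (t[k]) = some k := by
  rw [PySem.List.index?_eq_some_iff]
  refine ⟨t.take k, t.drop (k + 1), ?_, by rw [List.length_take]; omega, h3⟩
  conv_lhs => rw [← List.take_append_drop k t]
  rw [List.drop_eq_getElem_cons hk]

theorem pvFirst_of_index? {t : List String} {p : String} {k : Nat}
    (h : PySem.List.index? t p = some k) :
    ∃ hk : k < t.length, t[k] = p ∧ p ∉ t.take k := by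
  obtain ⟨hk, he, hj⟩ := PySem.List.getElem_of_index?_eq_some h
  refine ⟨hk, he, ?_⟩
  rw [List.mem_take_iff_getElem]
  rintro ⟨j, hjlt, hje⟩
  exact hj j (by omega) hje

theorem pvIdx_cons_cases {x : String} {t pv : List String} {z : Int}
    (hz : z ∈ pvIdxList (x :: t) pv) :
    z = 0 ∨ ∃ p ∈ pv, ∃ k, ∃ hk : k < t.length,
      t[k] = p ∧ p ≠ x ∧ p ∉ t.take k ∧ z = (k : Int) + 1 := by
  rcases mem_pvIdxList.1 hz with ⟨p, hp, k0, hidx, rfl⟩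
  cases k0 with
  | zero => exact Or.inl rfl
  | succ k =>
    have hpx : p ≠ x := by
      rintro rfl
      rw [PySem.List.index?_cons_self] at hidx
      cases hidx
    rw [PySem.List.index?_cons_of_ne _ (Ne.symm hpx)] at hidx
    cases hidx' : PySem.List.index? t p with
    | none => rw [hidx'] at hidx; cases hidx
    | some k' =>
      rw [hidx'] at hidx
      have hkk : k' = k := by simpa using hidx
      subst hkk
      obtain ⟨hk, he, h3⟩ := pvFirst_of_index? hidx'
      exact Or.inr ⟨p, hp, k', hk, he, hpx, h3, by push_cast; ring⟩

theorem pvAcore_elim (pv E : List String) (m M : Int)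
    (hlen : ¬ (pvIdxList E pv).length < 2)
    (hm : PySem.List.min? (pvIdxList E pv) (fun x => x) = some m)
    (hM : PySem.List.max? (pvIdxList E pv) (fun x => x) = some M) :
    pvAcore pv E = (PySem.List.pyRange m (M + 1) 1).foldl (fun acc i =>
        if i < (E.length : Int) then
          if PySem.Set.contains (PySem.Set.ofList pv) (PySem.List.pyGetD E i "") then acc
          else acc ++ [PySem.List.pyGetD E i ""]
        else acc) [] := by
  unfold pvAcore
  rw [if_neg hlen, hm, hM]

theorem pvAcore_eq_pvStart (E : List String) : ∀ pv : List String, pv ≠ [] →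
    pvAcore pv E = pvStart (PySem.Set.ofList pv) E := by
  induction E with
  | nil =>
    intro pv hpv
    rw [pvStart]
    unfold pvAcore
    rw [pvIdxList_nil]
    simp
  | cons x t ih =>
    intro pv hpv
    by_cases hx : x ∈ pv
    · -- x is a visited phase: both sides start here
      have hxV : x ∈ PySem.Set.ofList pv := (PySem.Set.mem_ofList _ _).2 hx
      have hcx : PySem.Set.contains (PySem.Set.ofList pv) x = true :=
        (PySem.Set.contains_iff _ _).2 hxV
      rw [pvStart, if_pos hxV, pvFlush_char]
      have hx0 : (0 : Int) ∈ pvIdxList (x :: t) pv :=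
        mem_pvIdxList.2 ⟨x, hx, 0, PySem.List.index?_cons_self .., rfl⟩
      cases hln : pvLastNew (PySem.Set.ofList pv) [x] t with
      | none =>
        -- no further milestone: every recorded index is 0
        have hall : ∀ z ∈ pvIdxList (x :: t) pv, z = 0 := by
          intro z hz
          rcases pvIdx_cons_cases hz with h0 | ⟨p, hp, k, hk, he, hpx, h3, rfl⟩
          · exact h0
          · have hmem := (pvLastNew_eq_none_iff _ t [x]).1 hln (t[k]) (List.getElem_mem _)
            rw [he] at hmem
            have := hmem ((PySem.Set.mem_ofList _ _).2 hp)
            simp at this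
            exact absurd this hpx
        by_cases hlen : (pvIdxList (x :: t) pv).length < 2
        · unfold pvAcore
          rw [if_pos hlen]
        · have hIne : pvIdxList (x :: t) pv ≠ [] := by
            intro he; rw [he] at hx0; cases hx0
          obtain ⟨m, hm⟩ : ∃ m, PySem.List.min? (pvIdxList (x :: t) pv) (fun x => x) = some m := by
            cases hmin : PySem.List.min? (pvIdxList (x :: t) pv) (fun x => x) with
            | none => exact absurd ((PySem.List.min?_eq_none_iff _ _).1 hmin) hIne
            | some m => exact ⟨m, rfl⟩
          obtain ⟨M, hM⟩ : ∃ M, PySem.List.max? (pvIdxList (x :: t) pv) (fun x => x) = some M := by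
            cases hmax : PySem.List.max? (pvIdxList (x :: t) pv) (fun x => x) with
            | none => exact absurd ((PySem.List.max?_eq_none_iff _ _).1 hmax) hIne
            | some M => exact ⟨M, rfl⟩
          have hm0 : m = 0 := hall m (PySem.List.min?_mem hm)
          have hM0 : M = 0 := hall M (PySem.List.max?_mem hM)
          subst hm0 hM0
          rw [pvAcore_elim pv (x :: t) 0 0 hlen hm hM]
          rw [pvComp 1 (x :: t) (PySem.Set.ofList pv) [] 0 (0 + 1) (by omega) (by omega) (by simp)]
          simp [hx]
      | some L =>
        -- the last milestone L of t gives max index L+1; the min index is 0 (x itself)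
        obtain ⟨hL, h1, h2, h3⟩ := pvLastNew_some_spec _ t [x] L hln
        have hne : t[L] ≠ x := by simpa using h2
        have hidx : PySem.List.index? (x :: t) (t[L]) = some (L + 1) := by
          rw [PySem.List.index?_cons_of_ne _ (Ne.symm hne), pvIndex?_of_first t L hL h3]
          rfl
        have hL1 : ((L : Int) + 1) ∈ pvIdxList (x :: t) pv :=
          mem_pvIdxList.2 ⟨t[L], (PySem.Set.mem_ofList _ _).1 h1, L + 1, hidx, by push_cast; ring⟩
        have hub : ∀ z ∈ pvIdxList (x :: t) pv, z ≤ (L : Int) + 1 := by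
          intro z hz
          rcases pvIdx_cons_cases hz with h0 | ⟨p, hp, k, hk, he, hpx, hp3, rfl⟩
          · rw [h0]; positivity
          · have hkL : k ≤ L := by
              refine pvLastNew_ge _ t [x] L hln k hk ?_ ?_ ?_
              · rw [he]; exact (PySem.Set.mem_ofList _ _).2 hp
              · rw [he]; simpa using hpx
              · rw [he]; exact hp3
            omega
        have h2le : 2 ≤ (pvIdxList (x :: t) pv).length :=
          pv_two_le_length hx0 hL1 (by omega)
        obtain ⟨m, hm⟩ : ∃ m, PySem.List.min? (pvIdxList (x :: t) pv) (fun x => x) = some m := by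
          cases hmin : PySem.List.min? (pvIdxList (x :: t) pv) (fun x => x) with
          | none =>
            have := (PySem.List.min?_eq_none_iff _ _).1 hmin
            rw [this] at h2le; simp at h2le
          | some m => exact ⟨m, rfl⟩
        obtain ⟨M, hM⟩ : ∃ M, PySem.List.max? (pvIdxList (x :: t) pv) (fun x => x) = some M := by
          cases hmax : PySem.List.max? (pvIdxList (x :: t) pv) (fun x => x) with
          | none =>
            have := (PySem.List.max?_eq_none_iff _ _).1 hmax
            rw [this] at h2le; simp at h2le
          | some M => exact ⟨M, rfl⟩
        have hm0 : m = 0 := by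
          have hle := PySem.List.min?_isMin hm 0 hx0
          have hge := (pvIdxList_bounds (PySem.List.min?_mem hm)).1
          omega
        have hMeq : M = (L : Int) + 1 := by
          have hle := hub M (PySem.List.max?_mem hM)
          have hge := PySem.List.max?_isMax hM _ hL1
          omega
        subst hm0 hMeq
        rw [pvAcore_elim pv (x :: t) 0 ((L : Int) + 1) (by omega) hm hM]
        rw [pvComp (L + 2) (x :: t) (PySem.Set.ofList pv) [] 0 ((L : Int) + 1 + 1)
          (by omega) (by omega) (by simp only [List.length_cons]; push_cast; omega)]
        rw [show (((L : Int) + 1 + 1) - 0).toNat = L + 2 from by omega]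
        simp only [Int.toNat_zero, List.drop_zero, List.take_succ_cons, List.filter_cons, hcx]
        simp
    · -- x not visited: A's indices shift by one, B skips x
      have hxV : x ∉ PySem.Set.ofList pv := fun hm => hx ((PySem.Set.mem_ofList _ _).1 hm)
      rw [pvStart, if_neg hxV, ← ih pv hpv]
      by_cases hlen : (pvIdxList t pv).length < 2
      · have hlen2 : (pvIdxList (x :: t) pv).length < 2 := by
          rw [pvIdxList_shift t pv hx, List.length_map]; exact hlen
        unfold pvAcore
        rw [if_pos hlen, if_pos hlen2]
      · have hlen2 : ¬ (pvIdxList (x :: t) pv).length < 2 := by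
          rw [pvIdxList_shift t pv hx, List.length_map]; exact hlen
        obtain ⟨m, hm⟩ : ∃ m, PySem.List.min? (pvIdxList t pv) (fun x => x) = some m := by
          cases hmin : PySem.List.min? (pvIdxList t pv) (fun x => x) with
          | none =>
            have := (PySem.List.min?_eq_none_iff _ _).1 hmin
            rw [this] at hlen; simp at hlen
          | some m => exact ⟨m, rfl⟩
        obtain ⟨M, hM⟩ : ∃ M, PySem.List.max? (pvIdxList t pv) (fun x => x) = some M := by
          cases hmax : PySem.List.max? (pvIdxList t pv) (fun x => x) with
          | none =>
            have := (PySem.List.max?_eq_none_iff _ _).1 hmax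
            rw [this] at hlen; simp at hlen
          | some M => exact ⟨M, rfl⟩
        have hm' : PySem.List.min? (pvIdxList (x :: t) pv) (fun x => x) = some (m + 1) := by
          rw [pvIdxList_shift t pv hx]; exact pv_min?_map_add_one _ m hm
        have hM' : PySem.List.max? (pvIdxList (x :: t) pv) (fun x => x) = some (M + 1) := by
          rw [pvIdxList_shift t pv hx]; exact pv_max?_map_add_one _ M hM
        rw [pvAcore_elim pv (x :: t) (m + 1) (M + 1) hlen2 hm' hM',
          pvAcore_elim pv t m M hlen hm hM]
        have hm0 : 0 ≤ m := (pvIdxList_bounds (PySem.List.min?_mem hm)).1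
        have hMlt : M < (t.length : Int) := (pvIdxList_bounds (PySem.List.max?_mem hM)).2
        rw [pvComp (M + 1 - m).toNat (x :: t) (PySem.Set.ofList pv) [] (m + 1) (M + 1 + 1)
          (by omega) (by omega) (by simp only [List.length_cons]; push_cast; omega)]
        rw [pvComp (M + 1 - m).toNat t (PySem.Set.ofList pv) [] m (M + 1)
          (by omega) (by omega) (by omega)]
        rw [show (m + 1).toNat = m.toNat + 1 from by omega, List.drop_succ_cons]
        rw [show M + 1 + 1 - (m + 1) = M + 1 - m from by ring]

theorem pvA_eq (session : List (String × List String)) (E : List String) :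
    detect_skipped_phases_dict_py session E =
      (if (PySem.Dict.getD (PySem.Dict.mk session) "phases_visited" []) = [] then []
       else pvAcore (PySem.Dict.getD (PySem.Dict.mk session) "phases_visited" []) E) := by
  simp only [detect_skipped_phases_dict_py]
  by_cases h : (PySem.Dict.getD (PySem.Dict.mk session) "phases_visited" []) = []
  · simp [h, PySem.Set.ofList_nil]
  · have hof : (PySem.Set.ofList (PySem.Dict.getD (PySem.Dict.mk session) "phases_visited" [])).isEmpty = false := by
      rw [List.isEmpty_eq_false_iff_exists_mem]
      rcases List.exists_mem_of_ne_nil _ h with ⟨x, hx⟩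
      exact ⟨x, by simpa [PySem.Set.mem_ofList] using hx⟩
    simp only [hof, Bool.false_eq_true, if_false, if_neg h]
    rw [← PySem.Dict.getD_eq_get?_getD]
    rw [pvIdxList_foldl]
    unfold pvAcore
    simp

theorem pvB_eq (session : List (String × List String)) (E : List String) :
    detect_skipped_phases_dict_py_alt session E =
      (if (PySem.Dict.getD (PySem.Dict.mk session) "phases_visited" []) = [] then []
       else pvStart (PySem.Set.ofList (PySem.Dict.getD (PySem.Dict.mk session) "phases_visited" [])) E) := by
  simp only [detect_skipped_phases_dict_py_alt]
  by_cases h : (PySem.Dict.getD (PySem.Dict.mk session) "phases_visited" []) = []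
  · simp [h]
  · have hie : (PySem.Dict.getD (PySem.Dict.mk session) "phases_visited" []).isEmpty = false := by
      simpa using h
    simp only [hie, Bool.false_eq_true, if_false, if_neg h]
    exact pvFoldB_notstarted _ E

-- ===== VERDICT (by name: the statement is the Claim_ definition above) =====
theorem detect_skipped_phases_dict_py_spec : Claim_equal_detect_skipped_phases_dict_py := by
  intro session E _
  unfold Spec_detect_skipped_phases_dict_py
  rw [pvA_eq, pvB_eq]
  by_cases h : (PySem.Dict.getD (PySem.Dict.mk session) "phases_visited" []) = []
  · simp [h]
  · simp only [if_neg h]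
    exact pvAcore_eq_pvStart E _ h
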